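-- pv_equiv track=rewrite | github.com/EldorMouyal/cube_solver | clustering_updated.py | find_closest_theta
-- ===== SOURCE A (Python) =====
-- import bisect
--
-- def find_closest_theta(rho_theta, arr):
--     rho_theta.sort(key=lambda x: x[1])  # Sort the larger array based on the first values
--     closest_pairs = []
--     for y in arr:
--         # Use bisect to find the insertion point of x in the sorted Y array
--         index = bisect.bisect_left([pair[1] for pair in rho_theta], y)
--
--         # Check if r is greater than all numbers in K or if r is less than all numbers in K
--         if index == len(rho_theta):
--             closest_pairs.append(rho_theta[-1])
--         elif index == 0:
--             closest_pairs.append(rho_theta[0])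
--         else:
--             # Get the closest pair in rho_theta to y based on the first value in each pair
--             closest_pair = rho_theta[index] if rho_theta[index][1] - y < y - rho_theta[index-1][1] else rho_theta[index-1]
--             closest_pairs.append(closest_pair)
--     return closest_pairs
-- ===== SOURCE B (Python) =====
-- def find_closest_theta(rho_theta, arr):
--     # Two-pointer merge: sort the queries as well, sweep the sorted rho_theta once
--     # with a monotone pointer (no per-query bisect), then restore the original
--     # query order. Sorts rho_theta in place, like the original.
--     rho_theta.sort(key=lambda x: x[1])
--     n = len(rho_theta)
--     filled = []
--     j = 0
--     for pos, y in sorted(enumerate(arr), key=lambda t: t[1]):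
--         while j + 1 < n and rho_theta[j][1] + rho_theta[j + 1][1] < 2 * y:
--             j += 1
--         filled.append((pos, rho_theta[j]))
--     filled.sort(key=lambda t: t[0])
--     return [pair for _, pair in filled]
-- ===== Notes on version B (the rewrite author's own statement) =====
-- stated objective: faster
-- what changed: B replaces the per-query bisect over a per-iteration rebuilt key list by a merge-style sweep: the queries are sorted too and a single monotone pointer advances over the sorted rho_theta (advance while rho_theta[j][1]+rho_theta[j+1][1] < 2*y), results being put back into original query order at the end.
import Mathlib
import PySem

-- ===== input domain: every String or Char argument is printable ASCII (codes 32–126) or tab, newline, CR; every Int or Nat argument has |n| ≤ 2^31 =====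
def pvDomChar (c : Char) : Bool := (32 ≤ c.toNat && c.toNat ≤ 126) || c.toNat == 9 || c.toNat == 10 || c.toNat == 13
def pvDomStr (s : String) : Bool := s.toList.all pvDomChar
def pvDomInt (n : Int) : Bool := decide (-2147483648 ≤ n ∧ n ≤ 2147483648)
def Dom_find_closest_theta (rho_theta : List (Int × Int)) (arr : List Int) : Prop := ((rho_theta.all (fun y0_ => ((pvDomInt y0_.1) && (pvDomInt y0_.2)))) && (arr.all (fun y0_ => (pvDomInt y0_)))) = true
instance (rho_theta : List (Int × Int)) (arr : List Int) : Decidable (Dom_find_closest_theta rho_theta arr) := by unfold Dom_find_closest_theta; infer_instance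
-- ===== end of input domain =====

-- B answers the queries by a merge-style sweep: queries sorted too, one monotone pointer
-- over the sorted rho_theta, results restored to original query order (objective: alternative/faster algorithm).
-- Note: both A and B sort rho_theta in place (same observable mutation); the claim is about the return value.

-- ===== PORT A =====
def find_closest_theta (rho_theta : List (Int × Int)) (arr : List Int) : List (Int × Int) :=
  let s := PySem.List.sorted rho_theta (fun x => x.2) false
  arr.foldl (fun closest_pairs y =>
    -- keys list rebuilt on every iteration, as in A
    let keys := s.map (fun pair => pair.2)
    let index := PySem.List.bisectLeft keys y
    if index = s.length then
      closest_pairs ++ [PySem.List.pyGetD s (-1) (0, 0)]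
    else if index = 0 then
      closest_pairs ++ [PySem.List.pyGetD s 0 (0, 0)]
    else
      let closest_pair :=
        if (PySem.List.pyGetD s (index : Int) (0, 0)).2 - y <
            y - (PySem.List.pyGetD s ((index : Int) - 1) (0, 0)).2 then
          PySem.List.pyGetD s (index : Int) (0, 0)
        else
          PySem.List.pyGetD s ((index : Int) - 1) (0, 0)
      closest_pairs ++ [closest_pair]) []

-- ===== PORT B =====
-- the inner 'while j + 1 < n and rho_theta[j][1] + rho_theta[j+1][1] < 2*y: j += 1' loop of Source B
-- (j is always in range where Python reads rho_theta[j]; getD is the in-range read)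
def pvWhile (s : List (Int × Int)) (y : Int) (j : Nat) : Nat :=
  if h : j + 1 < s.length ∧ (s.getD j (0, 0)).2 + (s.getD (j + 1) (0, 0)).2 < 2 * y then
    pvWhile s y (j + 1)
  else j
termination_by s.length - j
decreasing_by omega

def find_closest_theta_alt (rho_theta : List (Int × Int)) (arr : List Int) : List (Int × Int) :=
  let s := PySem.List.sorted rho_theta (fun x => x.2) false
  let queries := PySem.List.sorted (PySem.List.enumerate arr 0) (fun t => t.2) false
  let res := queries.foldl (fun (acc : List (Int × (Int × Int)) × Nat) t =>
      let j := pvWhile s t.2 acc.2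
      (acc.1 ++ [(t.1, s.getD j (0, 0))], j)) ([], 0)
  let filled := PySem.List.sorted res.1 (fun t => t.1) false
  filled.map (fun t => t.2)

-- ===== PRECONDITION & SPEC =====
-- Pre_ excludes exactly the inputs on which the Python A raises IndexError:
-- an empty rho_theta together with a nonempty arr (rho_theta[-1] on an empty list; B's rho_theta[j] raises there too).
def Pre_find_closest_theta (rho_theta : List (Int × Int)) (arr : List Int) : Prop :=
  rho_theta = [] → arr = []
instance (rho_theta : List (Int × Int)) (arr : List Int) : Decidable (Pre_find_closest_theta rho_theta arr) := by unfold Pre_find_closest_theta; infer_instance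
def pvWitness_find_closest_theta : (List (Int × Int)) × List Int := ([(1, 2), (3, 5)], [0, 4, 9])

def Spec_find_closest_theta (rho_theta : List (Int × Int)) (arr : List Int) (out : List (Int × Int)) : Prop := out = find_closest_theta_alt rho_theta arr
instance (rho_theta : List (Int × Int)) (arr : List Int) (out : List (Int × Int)) : Decidable (Spec_find_closest_theta rho_theta arr out) := by unfold Spec_find_closest_theta; infer_instance

-- ===== CLAIM (what is proved, stated in full; the proofs are below) =====
def Claim_equal_find_closest_theta : Prop := ∀ (rho_theta : List (Int × Int)) (arr : List Int), Dom_find_closest_theta rho_theta arr → Pre_find_closest_theta rho_theta arr → Spec_find_closest_theta rho_theta arr (find_closest_theta rho_theta arr)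

-- ===== LEMMAS AND PROOFS =====

-- the stopping condition of B's while loop at pointer position m
def pvStop (s : List (Int × Int)) (y : Int) (m : Nat) : Prop :=
  ¬ (m + 1 < s.length ∧ (s.getD m (0, 0)).2 + (s.getD (m + 1) (0, 0)).2 < 2 * y)

-- pvWhile s y j is the least m ≥ j with pvStop s y m
theorem pvWhile_spec (s : List (Int × Int)) (y : Int) :
    ∀ (n j : Nat), s.length - j ≤ n →
      pvStop s y (pvWhile s y j) ∧ j ≤ pvWhile s y j ∧
        ∀ m, j ≤ m → pvStop s y m → pvWhile s y j ≤ m := by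
  intro n
  induction n with
  | zero =>
    intro j hj
    have h : ¬ (j + 1 < s.length ∧ (s.getD j (0, 0)).2 + (s.getD (j + 1) (0, 0)).2 < 2 * y) := by
      intro hc; omega
    rw [pvWhile, dif_neg h]
    exact ⟨h, le_refl _, fun m hm _ => hm⟩
  | succ n ih =>
    intro j hj
    by_cases h : j + 1 < s.length ∧ (s.getD j (0, 0)).2 + (s.getD (j + 1) (0, 0)).2 < 2 * y
    · rw [pvWhile, dif_pos h]
      obtain ⟨h1, h2, h3⟩ := ih (j + 1) (by omega)
      refine ⟨h1, by omega, fun m hm hstop => ?_⟩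
      rcases Nat.eq_or_lt_of_le hm with he | hl
      · exact absurd h (he ▸ hstop)
      · exact h3 m hl hstop
    · rw [pvWhile, dif_neg h]
      exact ⟨h, le_refl _, fun m hm _ => hm⟩

theorem pvWhile_stop (s : List (Int × Int)) (y : Int) (j : Nat) :
    pvStop s y (pvWhile s y j) :=
  (pvWhile_spec s y (s.length - j) j (le_refl _)).1

theorem le_pvWhile (s : List (Int × Int)) (y : Int) (j : Nat) : j ≤ pvWhile s y j :=
  (pvWhile_spec s y (s.length - j) j (le_refl _)).2.1

theorem pvWhile_le (s : List (Int × Int)) (y : Int) (j m : Nat) (hm : j ≤ m)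
    (hstop : pvStop s y m) : pvWhile s y j ≤ m :=
  (pvWhile_spec s y (s.length - j) j (le_refl _)).2.2 m hm hstop

-- restarting the sweep at any j' between j and its result does not change the result
theorem pvWhile_restart (s : List (Int × Int)) (y : Int) (j j' : Nat)
    (h1 : j ≤ j') (h2 : j' ≤ pvWhile s y j) : pvWhile s y j' = pvWhile s y j :=
  le_antisymm (pvWhile_le s y j' (pvWhile s y j) h2 (pvWhile_stop s y j))
    (pvWhile_le s y j (pvWhile s y j') (le_trans h1 (le_pvWhile s y j')) (pvWhile_stop s y j'))

-- the pointer is monotone in the query value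
theorem pvWhile_mono (s : List (Int × Int)) (y y' : Int) (hy : y ≤ y') :
    pvWhile s y 0 ≤ pvWhile s y' 0 := by
  refine pvWhile_le s y 0 (pvWhile s y' 0) (Nat.zero_le _) ?_
  have h := pvWhile_stop s y' 0
  intro hc
  exact h ⟨hc.1, by omega⟩

-- the sweep started at 0 stops exactly at the first stopping position
theorem pvWhile_eq_first (s : List (Int × Int)) (y : Int) (m : Nat)
    (hadv : ∀ j < m, j + 1 < s.length ∧ (s.getD j (0, 0)).2 + (s.getD (j + 1) (0, 0)).2 < 2 * y)
    (hstop : pvStop s y m) : pvWhile s y 0 = m := by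
  have hle := pvWhile_le s y 0 m (Nat.zero_le _) hstop
  rcases Nat.eq_or_lt_of_le hle with he | hl
  · exact he
  · exact absurd (hadv _ hl) (pvWhile_stop s y 0)

-- the value A appends for a single query y (s is the sorted list)
def pvAStep (s : List (Int × Int)) (y : Int) : Int × Int :=
  let keys := s.map (fun pair => pair.2)
  let index := PySem.List.bisectLeft keys y
  if index = s.length then
    PySem.List.pyGetD s (-1) (0, 0)
  else if index = 0 then
    PySem.List.pyGetD s 0 (0, 0)
  else
    if (PySem.List.pyGetD s (index : Int) (0, 0)).2 - y <
        y - (PySem.List.pyGetD s ((index : Int) - 1) (0, 0)).2 then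
      PySem.List.pyGetD s (index : Int) (0, 0)
    else
      PySem.List.pyGetD s ((index : Int) - 1) (0, 0)

-- A's loop body appends exactly pvAStep
theorem pv_body (s : List (Int × Int)) (acc : List (Int × Int)) (y : Int) :
    (let keys := s.map (fun pair => pair.2)
     let index := PySem.List.bisectLeft keys y
     if index = s.length then
       acc ++ [PySem.List.pyGetD s (-1) (0, 0)]
     else if index = 0 then
       acc ++ [PySem.List.pyGetD s 0 (0, 0)]
     else
       let closest_pair :=
         if (PySem.List.pyGetD s (index : Int) (0, 0)).2 - y <
             y - (PySem.List.pyGetD s ((index : Int) - 1) (0, 0)).2 then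
           PySem.List.pyGetD s (index : Int) (0, 0)
         else
           PySem.List.pyGetD s ((index : Int) - 1) (0, 0)
       acc ++ [closest_pair]) = acc ++ [pvAStep s y] := by
  show _ = acc ++ [_]
  simp only [pvAStep]
  split_ifs <;> rfl

-- per-query agreement: A's appended value is s[pvWhile s y 0] on a nonempty sorted s
theorem pv_step (s : List (Int × Int)) (hs : s ≠ []) (y : Int)
    (hpw : (s.map (fun pair => pair.2)).Pairwise (· ≤ ·)) :
    pvAStep s y = s.getD (pvWhile s y 0) (0, 0) := by
  have hpos : 0 < s.length := List.length_pos_iff.mpr hs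
  have hlen : (s.map (fun pair => pair.2)).length = s.length := by simp
  obtain ⟨hle, hlt, hge⟩ := PySem.List.bisectLeft_spec (s.map (fun pair => pair.2)) y hpw
  rw [hlen] at hle
  set keys := s.map (fun pair => pair.2) with hk
  set i := PySem.List.bisectLeft keys y with hi
  have hlt' : ∀ j : Nat, j < i → (s.getD j (0, 0)).2 < y := by
    intro j hj
    have hjl : j < keys.length := by omega
    have h := hlt j hjl hj
    rw [show keys[j] = (s.getD j (0, 0)).2 by
      rw [List.getD_eq_getElem s (0, 0) (by omega)]; simp [hk]] at h
    exact h
  have hge' : ∀ j : Nat, j < s.length → i ≤ j → y ≤ (s.getD j (0, 0)).2 := by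
    intro j hjs hj
    have hjl : j < keys.length := by omega
    have h := hge j hjl hj
    rw [show keys[j] = (s.getD j (0, 0)).2 by
      rw [List.getD_eq_getElem s (0, 0) (by omega)]; simp [hk]] at h
    exact h
  unfold pvAStep
  simp only [← hk, ← hi]
  by_cases hc1 : i = s.length
  · -- all keys < y : A takes the last element; B's pointer runs to the end
    have hw : pvWhile s y 0 = s.length - 1 := by
      apply pvWhile_eq_first
      · intro j hj
        refine ⟨by omega, ?_⟩
        have l1 := hlt' j (by omega)
        have l2 := hlt' (j + 1) (by omega)
        omega
      · intro hc; omega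
    rw [if_pos hc1, hw, PySem.List.pyGetD_neg_one s (0, 0) hs, List.getLast_eq_getElem,
      List.getD_eq_getElem s (0, 0) (by omega)]
  · by_cases hc2 : i = 0
    · -- all keys ≥ y : both take the first element
      have hw : pvWhile s y 0 = 0 := by
        apply pvWhile_eq_first
        · intro j hj; omega
        · intro hc
          have g0 := hge' 0 (by omega) (by omega)
          have g1 := hge' (0 + 1) (by omega) (by omega)
          omega
      rw [if_neg hc1, if_pos hc2, hw, PySem.List.pyGetD_zero]
    · -- interior : A compares i vs i-1; B's pointer stops exactly there
      have h1 : 0 < i := Nat.pos_of_ne_zero hc2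
      have h2 : i < s.length := lt_of_le_of_ne hle hc1
      have e1 : PySem.List.pyGetD s (i : Int) (0, 0) = s.getD i (0, 0) :=
        PySem.List.pyGetD_natCast s i (0, 0)
      have e2 : PySem.List.pyGetD s ((i : Int) - 1) (0, 0) = s.getD (i - 1) (0, 0) := by
        rw [show ((i : Int) - 1) = ((i - 1 : Nat) : Int) by omega]
        exact PySem.List.pyGetD_natCast s (i - 1) (0, 0)
      have klt : (s.getD (i - 1) (0, 0)).2 < y := hlt' (i - 1) (by omega)
      have kge : y ≤ (s.getD i (0, 0)).2 := hge' i (by omega) (by omega)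
      have hadvlow : ∀ j, j < i - 1 →
          j + 1 < s.length ∧ (s.getD j (0, 0)).2 + (s.getD (j + 1) (0, 0)).2 < 2 * y := by
        intro j hj
        refine ⟨by omega, ?_⟩
        have l1 := hlt' j (by omega)
        have l2 := hlt' (j + 1) (by omega)
        omega
      rw [if_neg hc1, if_neg hc2]
      by_cases hcmp : (PySem.List.pyGetD s (i : Int) (0, 0)).2 - y <
          y - (PySem.List.pyGetD s ((i : Int) - 1) (0, 0)).2
      · -- A picks index i; the sweep also advances past i-1 and stops at i
        have hcmp' := hcmp
        rw [e1, e2] at hcmp'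
        have hw : pvWhile s y 0 = i := by
          apply pvWhile_eq_first
          · intro j hj
            rcases Nat.lt_or_ge j (i - 1) with hj' | hj'
            · exact hadvlow j hj'
            · have hji : j = i - 1 := by omega
              subst hji
              refine ⟨by omega, ?_⟩
              rw [show i - 1 + 1 = i by omega]
              omega
          · intro hc
            obtain ⟨hlt1, hsum⟩ := hc
            have g1 := hge' (i + 1) (by omega) (by omega)
            omega
        rw [if_pos hcmp, hw, e1]
      · -- A picks index i-1; the sweep stops at i-1
        have hcmp' := hcmp
        rw [e1, e2] at hcmp'
        have hw : pvWhile s y 0 = i - 1 := by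
          apply pvWhile_eq_first
          · exact hadvlow
          · intro hc
            obtain ⟨hlt1, hsum⟩ := hc
            rw [show i - 1 + 1 = i by omega] at hsum
            omega
        rw [if_neg hcmp, hw, e2]

-- B's fold over the sorted queries, with the carried pointer replaced by a fresh sweep per query
theorem pv_fold (s : List (Int × Int)) (qs : List (Int × Int)) :
    ∀ (acc : List (Int × (Int × Int))) (j0 : Nat),
      qs.Pairwise (fun a b => a.2 ≤ b.2) → (∀ q ∈ qs, j0 ≤ pvWhile s q.2 0) →
      (qs.foldl (fun (acc : List (Int × (Int × Int)) × Nat) t =>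
          let j := pvWhile s t.2 acc.2
          (acc.1 ++ [(t.1, s.getD j (0, 0))], j)) (acc, j0)).1
        = acc ++ qs.map (fun q => (q.1, s.getD (pvWhile s q.2 0) (0, 0))) := by
  induction qs with
  | nil => intro acc j0 _ _; simp
  | cons q t ih =>
    intro acc j0 hpw hj0
    have hq : j0 ≤ pvWhile s q.2 0 := hj0 q (List.mem_cons_self)
    have hrestart : pvWhile s q.2 j0 = pvWhile s q.2 0 :=
      pvWhile_restart s q.2 0 j0 (Nat.zero_le _) hq
    simp only [List.foldl_cons, List.pairwise_cons] at *
    rw [hrestart]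
    rw [ih (acc ++ [(q.1, s.getD (pvWhile s q.2 0) (0, 0))]) (pvWhile s q.2 0) hpw.2
      (fun q' hq' => le_trans (by rfl) (pvWhile_mono s q.2 q'.2 (hpw.1 q' hq')))]
    simp

-- ===== VERDICT (by name: the statement is the Claim_ definition above) =====
theorem find_closest_theta_spec : Claim_equal_find_closest_theta := by
  intro rho_theta arr _hdom hpre
  unfold Spec_find_closest_theta find_closest_theta find_closest_theta_alt
  by_cases hnil : rho_theta = []
  · subst hnil
    rw [hpre rfl]
    rfl
  · set s := PySem.List.sorted rho_theta (fun x => x.2) false with hsdef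
    have hs : s ≠ [] := by
      intro h
      apply hnil
      have hl := PySem.List.length_sorted rho_theta (fun x => x.2) false
      rw [← hsdef, h] at hl
      exact List.length_eq_zero_iff.mp hl.symm
    have hpw : (s.map (fun pair => pair.2)).Pairwise (· ≤ ·) :=
      PySem.List.sorted_map_key_pairwise rho_theta (fun pair => pair.2)
    -- A's side: the fold is a map of pvAStep
    have hA : arr.foldl (fun closest_pairs y =>
          let keys := s.map (fun pair => pair.2)
          let index := PySem.List.bisectLeft keys y
          if index = s.length then
            closest_pairs ++ [PySem.List.pyGetD s (-1) (0, 0)]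
          else if index = 0 then
            closest_pairs ++ [PySem.List.pyGetD s 0 (0, 0)]
          else
            let closest_pair :=
              if (PySem.List.pyGetD s (index : Int) (0, 0)).2 - y <
                  y - (PySem.List.pyGetD s ((index : Int) - 1) (0, 0)).2 then
                PySem.List.pyGetD s (index : Int) (0, 0)
              else
                PySem.List.pyGetD s ((index : Int) - 1) (0, 0)
            closest_pairs ++ [closest_pair]) []
        = arr.map (fun y => s.getD (pvWhile s y 0) (0, 0)) := by
      calc _ = arr.foldl (fun acc y => acc ++ [pvAStep s y]) [] := by
              congr 1
              funext acc y
              exact pv_body s acc y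
        _ = arr.map (pvAStep s) := PySem.List.foldl_append_singleton_eq_map _ arr []
        _ = arr.map (fun y => s.getD (pvWhile s y 0) (0, 0)) :=
              List.map_congr_left (fun y _ => pv_step s hs y hpw)
    rw [hA]
    -- B's side
    set queries := PySem.List.sorted (PySem.List.enumerate arr 0) (fun t => t.2) false with hqdef
    have hqpw : queries.Pairwise (fun a b => a.2 ≤ b.2) :=
      PySem.List.sorted_pairwise (PySem.List.enumerate arr 0) (fun t => t.2)
    have hres : (queries.foldl (fun (acc : List (Int × (Int × Int)) × Nat) t =>
          let j := pvWhile s t.2 acc.2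
          (acc.1 ++ [(t.1, s.getD j (0, 0))], j)) ([], 0)).1
        = queries.map (fun q => (q.1, s.getD (pvWhile s q.2 0) (0, 0))) := by
      rw [pv_fold s queries [] 0 hqpw (fun q _ => Nat.zero_le _)]
      simp
    show arr.map (fun y => s.getD (pvWhile s y 0) (0, 0))
        = (PySem.List.sorted (queries.foldl (fun (acc : List (Int × (Int × Int)) × Nat) t =>
            let j := pvWhile s t.2 acc.2
            (acc.1 ++ [(t.1, s.getD j (0, 0))], j)) ([], 0)).1 (fun t => t.1) false).map (fun t => t.2)
    rw [hres]
    have hsorted : PySem.List.sorted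
        (queries.map (fun q => (q.1, s.getD (pvWhile s q.2 0) (0, 0)))) (fun t => t.1) false
        = (PySem.List.enumerate arr 0).map (fun q => (q.1, s.getD (pvWhile s q.2 0) (0, 0))) := by
      apply PySem.List.sorted_eq_of_perm_of_pairwise_lt
      · exact (List.Perm.map _ (PySem.List.sorted_perm (PySem.List.enumerate arr 0) (fun t => t.2) false)).symm
      · exact List.Pairwise.map _ (fun {a b} h => h) (PySem.List.pairwise_lt_enumerate arr 0)
    rw [hsorted, List.map_map]
    have : ((fun t : Int × (Int × Int) => t.2) ∘ (fun q : Int × Int => (q.1, s.getD (pvWhile s q.2 0) (0, 0))))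
        = (fun y => s.getD (pvWhile s y 0) (0, 0)) ∘ (fun q : Int × Int => q.2) := rfl
    rw [this, ← List.map_map, PySem.List.map_snd_enumerate]
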